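-- pv_equiv track=rewrite | github.com/toxic-byte/learn | shopee.py | min_deletions_to_contain_substring_shopee
-- ===== SOURCE A (Python) =====
-- def min_deletions_to_contain_substring_shopee(s: str) -> int:
--     target = "shopee"
--     n = len(s)
--     m = len(target)
--     INF = 10**9
--     ans = INF
--
--     for start in range(n):
--         i = start
--         t = 0
--         # 在从 start 开始的后缀里寻找 target 的子序列
--         while i < n and t < m:
--             if s[i] == target[t]:
--                 t += 1
--             i += 1
--         if t == m:
--             end = i - 1  # 最后一个匹配字符的位置
--             deletions = (end - start + 1) - m
--             ans = min(ans, deletions)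
--
--     return -1 if ans == INF else ans
-- ===== SOURCE B (Python) =====
-- def min_deletions_to_contain_substring_shopee(s: str) -> int:
--     # One backward pass: e_t = end index of the greedy match of "shopee"[t:]
--     # in s[i:]; a candidate window starts at each occurrence of the pattern's first character.
--     e0 = e1 = e2 = e3 = e4 = e5 = None
--     best = None
--     for i, c in reversed(list(enumerate(s))):
--         e0, e1, e2, e3, e4, e5 = (
--             e1 if c == 's' else e0,
--             e2 if c == 'h' else e1,
--             e3 if c == 'o' else e2,
--             e4 if c == 'p' else e3,
--             e5 if c == 'e' else e4,
--             i if c == 'e' else e5,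
--         )
--         if c == 's' and e0 is not None:
--             d = e0 - i - 5
--             if best is None or d < best:
--                 best = d
--     return -1 if best is None else best
-- ===== Notes on version B (the rewrite author's own statement) =====
-- stated objective: faster
-- what changed: Replaced A's greedy rescan from every start position (O(n^2)) by a single right-to-left pass that maintains, for each suffix of the pattern "shopee", the end position of its greedy match, emitting a candidate at every position holding the first pattern character.
import Mathlib
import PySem

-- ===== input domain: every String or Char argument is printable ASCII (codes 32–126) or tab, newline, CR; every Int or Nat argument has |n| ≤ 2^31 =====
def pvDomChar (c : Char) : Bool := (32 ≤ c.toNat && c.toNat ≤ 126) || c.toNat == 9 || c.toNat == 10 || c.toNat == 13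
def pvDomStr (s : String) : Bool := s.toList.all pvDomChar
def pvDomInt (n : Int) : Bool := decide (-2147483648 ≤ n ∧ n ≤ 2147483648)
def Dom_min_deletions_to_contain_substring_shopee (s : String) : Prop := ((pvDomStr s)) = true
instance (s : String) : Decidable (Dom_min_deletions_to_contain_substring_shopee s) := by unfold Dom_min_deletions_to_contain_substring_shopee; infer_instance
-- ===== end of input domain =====

-- B replaces A's quadratic scan-per-start with one backward pass keeping the greedy
-- end position of each suffix "shopee"[t:] (objective: faster, O(n) vs O(n^2)).

-- ===== PORT A =====
def pvTargetA : List Char := "shopee".toList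

-- A's inner `while i < n and t < m` loop (m = 6): returns the final (i, t).
def pvAInner (cs : List Char) (i t : Nat) : Nat × Nat :=
  if i < cs.length ∧ t < 6 then
    pvAInner cs (i + 1) (if cs.getD i ' ' = pvTargetA.getD t ' ' then t + 1 else t)
  else (i, t)
termination_by cs.length - i
decreasing_by omega

-- A's outer loop body: `if t == m: deletions = (end - start + 1) - m; ans = min(ans, deletions)`
def pvFA (cs : List Char) (ans : Int) (start : Nat) : Int :=
  let p := pvAInner cs start 0
  if p.2 = 6 then min ans (((p.1 : Int) - 1) - (start : Int) + 1 - 6) else ans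

def min_deletions_to_contain_substring_shopee (s : String) : Int :=
  let cs := s.toList
  let n := cs.length
  let INF : Int := 10 ^ 9
  let ans := (List.range n).foldl (pvFA cs) INF
  if ans = INF then -1 else ans

-- ===== PORT B =====
-- state: ((e0,…,e5), best); e_t = end index of the greedy match of the pattern tail starting at t in the suffix
def pvBStep (st : (Option Int × Option Int × Option Int × Option Int × Option Int × Option Int) × Option Int)
    (ic : Int × Char) :
    (Option Int × Option Int × Option Int × Option Int × Option Int × Option Int) × Option Int :=
  let ((e0, e1, e2, e3, e4, e5), best) := st
  let (i, c) := ic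
  let f0 := if c = 's' then e1 else e0
  let f1 := if c = 'h' then e2 else e1
  let f2 := if c = 'o' then e3 else e2
  let f3 := if c = 'p' then e4 else e3
  let f4 := if c = 'e' then e5 else e4
  let f5 := if c = 'e' then some i else e5
  let best' :=
    if c = 's' then
      match f0 with
      | some e =>
        let d := e - i - 5
        match best with
        | none => some d
        | some b => some (if d < b then d else b)
      | none => best
    else best
  ((f0, f1, f2, f3, f4, f5), best')

def min_deletions_to_contain_substring_shopee_alt (s : String) : Int :=
  let final := ((PySem.List.enumerate s.toList).reverse).foldl pvBStep
      ((none, none, none, none, none, none), none)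
  match final.2 with
  | none => -1
  | some b => b

-- ===== PRECONDITION & SPEC =====
-- Pre_ excludes only astronomically long strings (more than 10^9 characters), on which a
-- minimal window can need ≥ 10^9 deletions and collide with A's INF sentinel (A would then
-- return -1 instead of the count); no such input is executable in practice.
def Pre_min_deletions_to_contain_substring_shopee (s : String) : Prop :=
  (s.toList.length : Int) ≤ 10 ^ 9
instance (s : String) : Decidable (Pre_min_deletions_to_contain_substring_shopee s) := by
  unfold Pre_min_deletions_to_contain_substring_shopee; infer_instance

def pvWitness_min_deletions_to_contain_substring_shopee : String := "shopee"

def Spec_min_deletions_to_contain_substring_shopee (s : String) (out : Int) : Prop := out = min_deletions_to_contain_substring_shopee_alt s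
instance (s : String) (out : Int) : Decidable (Spec_min_deletions_to_contain_substring_shopee s out) := by unfold Spec_min_deletions_to_contain_substring_shopee; infer_instance

-- ===== CLAIM (what is proved, stated in full; the proofs are below) =====
def Claim_equal_min_deletions_to_contain_substring_shopee : Prop := ∀ (s : String), Dom_min_deletions_to_contain_substring_shopee s → Pre_min_deletions_to_contain_substring_shopee s → Spec_min_deletions_to_contain_substring_shopee s (min_deletions_to_contain_substring_shopee s)

-- ===== LEMMAS AND PROOFS =====

-- greedy consumed-count: pvG l t = number of characters the greedy scan eats from l to
-- finish "shopee"[t:], none if it cannot.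
def pvG (l : List Char) (t : Nat) : Option Nat :=
  match l with
  | [] => if 6 ≤ t then some 0 else none
  | c :: l' =>
    if 6 ≤ t then some 0
    else if c = pvTargetA.getD t ' ' then (pvG l' (t + 1)).map (· + 1)
    else (pvG l' t).map (· + 1)

lemma pvG_six (l : List Char) : pvG l 6 = some 0 := by
  cases l <;> simp [pvG]

lemma pvG_le (l : List Char) : ∀ t k, pvG l t = some k → k ≤ l.length := by
  induction l with
  | nil => intro t k h; simp [pvG] at h; omega
  | cons c l' ih =>
    intro t k h
    simp only [pvG] at h
    split at h
    · simp at h; omega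
    · split at h <;>
      · cases hg : pvG l' _ with
        | none => rw [hg] at h; simp at h
        | some k' =>
          rw [hg] at h; simp at h
          have := ih _ _ hg
          simp [List.length_cons]; omega

-- min over candidates of all suffixes (A's order, accumulator threaded)
def pvUpd (acc : Int) (l : List Char) : Int :=
  match pvG l 0 with
  | some k => min acc ((k : Int) - 6)
  | none => acc

def pvAllMin (l : List Char) (acc : Int) : Int :=
  match l with
  | [] => acc
  | c :: l' => pvAllMin l' (pvUpd acc (c :: l'))

-- min over candidates of suffixes headed by the first pattern character (B's quantity)
def pvBest (l : List Char) : Option Int :=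
  match l with
  | [] => none
  | c :: l' =>
    let b := pvBest l'
    if c = 's' then
      match pvG (c :: l') 0 with
      | some k =>
        let d : Int := (k : Int) - 6
        some (match b with | none => d | some bb => if d < bb then d else bb)
      | none => b
    else b

def pvEmap (i : Int) (l : List Char) (t : Nat) : Option Int :=
  (pvG l t).map (fun k => i + (k : Int) - 1)

lemma pvAInner_some (cs : List Char) : ∀ i t k, t ≤ 6 → pvG (cs.drop i) t = some k →
    pvAInner cs i t = (i + k, 6) := by
  intro i
  induction hd : cs.length - i using Nat.strong_induction_on generalizing i with
  | _ d ih =>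
  intro t k ht hg
  rw [pvAInner]
  by_cases hi : i < cs.length ∧ t < 6
  · obtain ⟨h1, h2⟩ := hi
    rw [List.drop_eq_getElem_cons h1] at hg
    simp only [pvG] at hg
    have h6 : ¬ (6 ≤ t) := by omega
    rw [if_neg h6] at hg
    rw [if_pos (And.intro h1 h2), List.getD_eq_getElem _ _ h1]
    split at hg <;> rename_i hc
    · cases hg' : pvG (cs.drop (i+1)) (t+1) with
      | none => rw [hg'] at hg; simp at hg
      | some k' =>
        rw [hg'] at hg; simp at hg
        rw [if_pos hc]
        rw [ih (cs.length - (i+1)) (by omega) (i+1) rfl (t+1) k' (by omega) hg']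
        subst hd; simp; omega
    · cases hg' : pvG (cs.drop (i+1)) t with
      | none => rw [hg'] at hg; simp at hg
      | some k' =>
        rw [hg'] at hg; simp at hg
        rw [if_neg hc]
        rw [ih (cs.length - (i+1)) (by omega) (i+1) rfl t k' (by omega) hg']
        subst hd; simp; omega
  · rw [if_neg hi]
    by_cases h6 : t = 6
    · subst h6
      rw [pvG_six] at hg
      simp at hg
      simp [hg]
    · have hlen : cs.length ≤ i := by
        rcases Nat.lt_or_ge i cs.length with hil | hil
        · exact absurd ⟨hil, by omega⟩ hi
        · exact hil
      rw [List.drop_eq_nil_of_le hlen] at hg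
      simp [pvG] at hg
      omega

lemma pvAInner_none (cs : List Char) : ∀ i t, t < 6 → pvG (cs.drop i) t = none →
    (pvAInner cs i t).2 < 6 := by
  intro i
  induction hd : cs.length - i using Nat.strong_induction_on generalizing i with
  | _ d ih =>
  intro t ht hg
  rw [pvAInner]
  by_cases hi : i < cs.length ∧ t < 6
  · obtain ⟨h1, h2⟩ := hi
    rw [List.drop_eq_getElem_cons h1] at hg
    simp only [pvG] at hg
    have h6 : ¬ (6 ≤ t) := by omega
    rw [if_neg h6] at hg
    rw [if_pos (And.intro h1 h2), List.getD_eq_getElem _ _ h1]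
    split at hg <;> rename_i hc
    · rw [if_pos hc]
      by_cases ht1 : t + 1 = 6
      · rw [ht1, pvG_six] at hg; simp at hg
      · exact ih (cs.length - (i+1)) (by omega) (i+1) rfl (t+1) (by omega)
          (by cases hg' : pvG (cs.drop (i+1)) (t+1) <;> simp_all)
    · rw [if_neg hc]
      exact ih (cs.length - (i+1)) (by omega) (i+1) rfl t ht
        (by cases hg' : pvG (cs.drop (i+1)) t <;> simp_all)
  · rw [if_neg hi]; simpa using ht

lemma pvFA_eq_upd (cs : List Char) (acc : Int) (j : Nat) :
    pvFA cs acc j = pvUpd acc (cs.drop j) := by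
  unfold pvFA pvUpd
  cases hg : pvG (cs.drop j) 0 with
  | none =>
    have h := pvAInner_none cs j 0 (by omega) hg
    simp only []
    rw [if_neg (by omega)]
  | some k =>
    have h := pvAInner_some cs j 0 k (by omega) hg
    rw [h]
    have he : ((j : Int) + (k : Int) - 1 - (j : Int) + 1 - 6) = (k : Int) - 6 := by ring
    simp [he]

lemma A_fold (cs : List Char) : ∀ d j acc, cs.length - j = d →
    (List.range' j (cs.length - j)).foldl (pvFA cs) acc = pvAllMin (cs.drop j) acc := by
  intro d
  induction d with
  | zero =>
    intro j acc h
    rw [h, List.drop_eq_nil_of_le (by omega)]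
    simp [pvAllMin]
  | succ d ih =>
    intro j acc h
    have hj : j < cs.length := by omega
    rw [h, List.range'_succ, List.foldl_cons]
    have hdrop : cs.drop j = cs[j] :: cs.drop (j + 1) := List.drop_eq_getElem_cons hj
    rw [hdrop]
    simp only [pvAllMin]
    rw [← hdrop, pvFA_eq_upd]
    have := ih (j + 1) (pvFA cs acc j) (by omega)
    rw [pvFA_eq_upd] at this
    rw [show cs.length - (j + 1) = d by omega] at this
    exact this

lemma pvG_cons_zero (c : Char) (l : List Char) :
    pvG (c :: l) 0 = if c = 's' then (pvG l 1).map (· + 1) else (pvG l 0).map (· + 1) := by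
  have h : pvTargetA[0]?.getD ' ' = 's' := by decide
  simp [pvG, h]

lemma pvBest_le (l : List Char) : ∀ k, pvG l 0 = some k →
    ∃ b, pvBest l = some b ∧ b ≤ (k : Int) - 6 := by
  induction l with
  | nil => intro k hk; simp [pvG] at hk
  | cons c l' ih =>
    intro k hk0
    have hk := hk0
    rw [pvG_cons_zero] at hk
    by_cases hc : c = 's'
    · rw [if_pos hc] at hk
      simp only [pvBest, if_pos hc, hk0]
      cases hb : pvBest l' <;> simp <;> split_ifs <;> omega
    · rw [if_neg hc] at hk
      cases hg : pvG l' 0 with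
      | none => rw [hg] at hk; simp at hk
      | some k' =>
        rw [hg] at hk; simp at hk
        obtain ⟨b, hb, hble⟩ := ih k' hg
        exact ⟨b, by simp [pvBest, hc, hb], by omega⟩

lemma pvBest_bound (l : List Char) : ∀ b, pvBest l = some b → b + 6 ≤ (l.length : Int) := by
  induction l with
  | nil => intro b hb; simp [pvBest] at hb
  | cons c l' ih =>
    intro b hb
    simp only [pvBest] at hb
    by_cases hc : c = 's'
    · rw [if_pos hc] at hb
      cases hg : pvG (c :: l') 0 with
      | none =>
        rw [hg] at hb
        have := ih b hb
        simp only [List.length_cons]; push_cast; omega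
      | some k =>
        rw [hg] at hb
        have hk := pvG_le (c :: l') 0 k hg
        simp only [List.length_cons] at hk ⊢
        cases hbb : pvBest l' with
        | none => rw [hbb] at hb; simp at hb; push_cast; omega
        | some bb =>
          rw [hbb] at hb; simp at hb
          have := ih bb hbb
          split_ifs at hb <;> push_cast at this ⊢ <;> omega
    · rw [if_neg hc] at hb
      have := ih b hb
      simp only [List.length_cons]; push_cast; omega

lemma allmin_best (l : List Char) : ∀ acc,
    pvAllMin l acc = match pvBest l with | none => acc | some b => min acc b := by
  induction l with
  | nil => intro acc; simp [pvAllMin, pvBest]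
  | cons c l' ih =>
    intro acc
    simp only [pvAllMin]
    rw [ih]
    by_cases hc : c = 's'
    · subst hc
      cases hg : pvG ('s' :: l') 0 with
      | none => simp [pvBest, pvUpd, hg]
      | some k =>
        simp only [pvBest, pvUpd, if_pos rfl, hg]
        cases hbb : pvBest l' with
        | none => simp
        | some bb =>
          simp
          congr 1
          rw [min_def]
          split_ifs <;> omega
    · have hg0 := pvG_cons_zero c l'
      rw [if_neg hc] at hg0
      cases hg : pvG l' 0 with
      | none => simp [pvBest, pvUpd, hc, hg0, hg]
      | some k' =>
        obtain ⟨b, hb, hble⟩ := pvBest_le l' k' hg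
        simp only [pvBest, pvUpd, if_neg hc, hg0, hg, Option.map_some, hb, min_def]
        split_ifs <;> omega

lemma pvEmap_step (i : Int) (c : Char) (l : List Char) (t : Nat) (h : t < 5) :
    (if c = pvTargetA.getD t ' ' then pvEmap (i + 1) l (t + 1) else pvEmap (i + 1) l t)
      = pvEmap i (c :: l) t := by
  unfold pvEmap
  simp only [pvG, if_neg (show ¬ 6 ≤ t by omega)]
  split_ifs with hc
  · cases pvG l (t + 1) with
    | none => simp
    | some k => simp; push_cast; ring
  · cases pvG l t with
    | none => simp
    | some k => simp; push_cast; ring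

lemma pvEmap_step5 (i : Int) (c : Char) (l : List Char) :
    (if c = 'e' then some i else pvEmap (i + 1) l 5) = pvEmap i (c :: l) 5 := by
  have h5 : pvTargetA.getD 5 ' ' = 'e' := by decide
  unfold pvEmap
  simp only [pvG, h5, show ¬ ((6 : Nat) ≤ 5) by omega, if_false, if_neg]
  split_ifs with hc
  · rw [pvG_six]; simp
  · cases pvG l 5 with
    | none => simp
    | some k => simp; push_cast; ring

lemma B_fold (l : List Char) : ∀ (i : Int),
    List.foldr (fun x st => pvBStep st x) ((none, none, none, none, none, none), none)
      (PySem.List.enumerate l i)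
    = ((pvEmap i l 0, pvEmap i l 1, pvEmap i l 2, pvEmap i l 3, pvEmap i l 4, pvEmap i l 5),
       pvBest l) := by
  induction l with
  | nil => intro i; simp [PySem.List.enumerate_nil, pvEmap, pvG, pvBest]
  | cons c l' ih =>
    intro i
    rw [PySem.List.enumerate_cons, List.foldr_cons, ih (i + 1)]
    simp only [pvBStep]
    refine Prod.ext ?_ ?_
    · simp only [Prod.mk.injEq]
      refine ⟨?_, ?_, ?_, ?_, ?_, ?_⟩
      · rw [show ('s' : Char) = pvTargetA.getD 0 ' ' from by decide]
        exact pvEmap_step i c l' 0 (by omega)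
      · rw [show ('h' : Char) = pvTargetA.getD 1 ' ' from by decide]
        exact pvEmap_step i c l' 1 (by omega)
      · rw [show ('o' : Char) = pvTargetA.getD 2 ' ' from by decide]
        exact pvEmap_step i c l' 2 (by omega)
      · rw [show ('p' : Char) = pvTargetA.getD 3 ' ' from by decide]
        exact pvEmap_step i c l' 3 (by omega)
      · rw [show ('e' : Char) = pvTargetA.getD 4 ' ' from by decide]
        exact pvEmap_step i c l' 4 (by omega)
      · exact pvEmap_step5 i c l'
    · by_cases hc : c = 's'
      · subst hc
        have hg0 := pvG_cons_zero 's' l'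
        rw [if_pos rfl] at hg0
        simp only [if_pos rfl]
        cases hg : pvG l' 1 with
        | none => simp [pvBest, hg0, hg, pvEmap]
        | some k =>
          have hE : pvEmap (i + 1) l' 1 = some (i + (k : Int)) := by
            simp [pvEmap, hg]; ring
          simp only [hE, pvBest, hg0, hg, Option.map_some, if_true]
          cases pvBest l' with
          | none => simp; omega
          | some bb => simp; split_ifs <;> omega
      · have hg0 := pvG_cons_zero c l'
        rw [if_neg hc] at hg0
        simp [pvBest, hc]

-- ===== VERDICT (by name: the statement is the Claim_ definition above) =====
theorem min_deletions_to_contain_substring_shopee_spec : Claim_equal_min_deletions_to_contain_substring_shopee := by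
  intro s _dom hpre
  unfold Spec_min_deletions_to_contain_substring_shopee
  unfold min_deletions_to_contain_substring_shopee min_deletions_to_contain_substring_shopee_alt
  simp only [List.foldl_reverse]
  rw [B_fold s.toList 0]
  have hA : (List.range s.toList.length).foldl (pvFA s.toList) (10 ^ 9)
      = pvAllMin s.toList (10 ^ 9) := by
    have h0 : s.toList.length - 0 = s.toList.length := by omega
    have := A_fold s.toList s.toList.length 0 (10 ^ 9) (by omega)
    rw [h0] at this
    rw [List.range_eq_range', this, List.drop_zero]
  rw [hA, allmin_best]
  cases hb : pvBest s.toList with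
  | none => simp
  | some b =>
    have hbound := pvBest_bound s.toList b hb
    unfold Pre_min_deletions_to_contain_substring_shopee at hpre
    simp only [min_def]
    split_ifs <;> omega
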